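-- pv_equiv track=rewrite | github.com/ss3398/Python | f2/gji.py | check_for_all_zeros
-- ===== SOURCE A (Python) =====
-- def check_for_all_zeros(X,i,j):
--     non_zeros = []
--     first_non_zero = -1
--     for m in range(i,len(X)):
--         non_zero = X[m][j]!=0
--         non_zeros.append(non_zero)
--         if first_non_zero==-1 and non_zero:
--             first_non_zero = m
--     zero_sum = sum(non_zeros)
--     return zero_sum, first_non_zero
-- ===== SOURCE B (Python) =====
-- def check_for_all_zeros(X, i, j):
--     rows = range(i, len(X))
--     count = sum(1 for m in rows if X[m][j] != 0)
--     first = next((m for m in rows if X[m][j] != 0), -1)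
--     return count, first
-- ===== Notes on version B (the rewrite author's own statement) =====
-- stated objective: simpler
-- what changed: Replaces the single loop that builds a boolean list and threads a sentinel-guarded first-index variable by two independent passes: a standalone count reduction and a short-circuiting next(...) search for the first non-zero row; no intermediate list is materialised.
-- outside the precondition, e.g. on check_for_all_zeros([[0], [1]], -1, 0): A returns (2, 1), B returns (2, -1)
import Mathlib
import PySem

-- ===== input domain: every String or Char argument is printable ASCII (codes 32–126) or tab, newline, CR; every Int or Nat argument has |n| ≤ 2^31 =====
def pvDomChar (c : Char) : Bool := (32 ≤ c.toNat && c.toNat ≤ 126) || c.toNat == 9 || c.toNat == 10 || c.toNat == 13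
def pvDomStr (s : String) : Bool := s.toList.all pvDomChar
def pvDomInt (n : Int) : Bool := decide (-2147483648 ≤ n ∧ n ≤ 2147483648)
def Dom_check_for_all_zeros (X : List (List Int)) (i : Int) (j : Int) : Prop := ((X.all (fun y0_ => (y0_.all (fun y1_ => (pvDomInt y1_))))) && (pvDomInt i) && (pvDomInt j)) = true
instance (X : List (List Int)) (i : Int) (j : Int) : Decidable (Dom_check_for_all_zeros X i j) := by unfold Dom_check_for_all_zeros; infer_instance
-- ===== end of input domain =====

-- ===== PORT A =====
-- shared access helper: X[m][j] via Python indexing (negative wraps, out-of-range = none);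
-- default 0/[] is never reached under Pre_check_for_all_zeros
def pyAt (X : List (List Int)) (m : Int) (j : Int) : Int :=
  (PySem.List.pyGet? ((PySem.List.pyGet? X m).getD []) j).getD 0

-- the for-loop of A: threads the boolean list and the sentinel-guarded first index
def cfazLoop (X : List (List Int)) (j : Int) : List Int → List Bool → Int → List Bool × Int
  | [], non_zeros, first => (non_zeros, first)
  | m :: ms, non_zeros, first =>
      let non_zero : Bool := pyAt X m j != 0
      cfazLoop X j ms (non_zeros ++ [non_zero])
        (if first == -1 && non_zero then m else first)

def check_for_all_zeros (X : List (List Int)) (i : Int) (j : Int) : Int × Int :=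
  let st := cfazLoop X j (PySem.List.pyRange i (X.length : Int) 1) [] (-1)
  ((st.1.map (fun b => if b then (1 : Int) else 0)).sum, st.2)

-- ===== PORT B =====
def check_for_all_zeros_alt (X : List (List Int)) (i : Int) (j : Int) : Int × Int :=
  let rows := PySem.List.pyRange i (X.length : Int) 1
  let count : Int := ((rows.filter (fun m => pyAt X m j != 0)).length : Int)
  let first : Int :=
    match rows.find? (fun m => pyAt X m j != 0) with
    | some m => m
    | none => -1
  (count, first)

-- ===== PRECONDITION & SPEC =====
-- Pre_ excludes (a) inputs where some X[m][j] access raises IndexError (A returns nothing there)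
-- and (b) negative start rows i < 0, outside the function's natural domain: there Python's
-- negative-index wraparound can make row index -1 collide with A's -1 sentinel.
def Pre_check_for_all_zeros (X : List (List Int)) (i : Int) (j : Int) : Prop :=
  0 ≤ i ∧ ∀ row ∈ X.drop i.toNat, (PySem.List.pyGet? row j).isSome
instance (X : List (List Int)) (i : Int) (j : Int) : Decidable (Pre_check_for_all_zeros X i j) := by
  unfold Pre_check_for_all_zeros; infer_instance

def pvWitness_check_for_all_zeros : List (List Int) × Int × Int := ([[0, 1], [2, 0]], 0, 1)

def Spec_check_for_all_zeros (X : List (List Int)) (i : Int) (j : Int) (out : Int × Int) : Prop := out = check_for_all_zeros_alt X i j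
instance (X : List (List Int)) (i : Int) (j : Int) (out : Int × Int) : Decidable (Spec_check_for_all_zeros X i j out) := by unfold Spec_check_for_all_zeros; infer_instance

-- ===== CLAIM (what is proved, stated in full; the proofs are below) =====
def Claim_equal_check_for_all_zeros : Prop := ∀ (X : List (List Int)) (i : Int) (j : Int), Dom_check_for_all_zeros X i j → Pre_check_for_all_zeros X i j → Spec_check_for_all_zeros X i j (check_for_all_zeros X i j)

-- ===== LEMMAS AND PROOFS =====

theorem cfazLoop_fst (X : List (List Int)) (j : Int) (L : List Int) :
    ∀ (acc : List Bool) (f : Int),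
      (cfazLoop X j L acc f).1 = acc ++ L.map (fun m => pyAt X m j != 0) := by
  induction L with
  | nil => intro acc f; simp [cfazLoop]
  | cons m ms ih => intro acc f; simp [cfazLoop, ih]

theorem cfazLoop_snd (X : List (List Int)) (j : Int) (L : List Int)
    (hL : ∀ m ∈ L, 0 ≤ m) :
    ∀ (acc : List Bool),
      (cfazLoop X j L acc (-1)).2 =
        match L.find? (fun m => pyAt X m j != 0) with
        | some m => m
        | none => -1 := by
  induction L with
  | nil => intro acc; simp [cfazLoop]
  | cons m ms ih =>
    intro acc
    have hm : (0:Int) ≤ m := hL m (by simp)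
    by_cases hz : pyAt X m j != 0
    · simp only [cfazLoop, hz, List.find?]
      have : ((-1 : Int) == -1 && true) = true := by decide
      simp only [this, if_true]
      -- once first = m ≥ 0, the loop never changes it
      have keep : ∀ (ms' : List Int) (acc' : List Bool) (f : Int), f ≠ -1 →
          (cfazLoop X j ms' acc' f).2 = f := by
        intro ms'
        induction ms' with
        | nil => intro acc' f hf; simp [cfazLoop]
        | cons a as ih2 =>
          intro acc' f hf
          simp only [cfazLoop]
          have : (f == -1) = false := by simp [hf]
          simp only [this, Bool.false_and]
          exact ih2 _ f hf
      exact keep ms _ m (by omega)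
    · simp only [cfazLoop, hz, List.find?]
      have : ((-1 : Int) == -1 && false) = false := by decide
      simp only [this]
      exact ih (fun x hx => hL x (by simp [hx])) _

theorem sum_indicator_eq_count (L : List Int) (p : Int → Bool) :
    ((((L.map p)).map (fun b => if b then (1 : Int) else 0)).sum) = ((L.filter p).length : Int) := by
  induction L with
  | nil => simp
  | cons m ms ih =>
    simp only [List.map_cons, List.sum_cons, List.filter_cons]
    by_cases h : p m <;>
      simp only [h, if_true, List.length_cons] <;>
      rw [ih] <;> push_cast <;> omega

-- ===== VERDICT (by name: the statement is the Claim_ definition above) =====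
theorem check_for_all_zeros_spec : Claim_equal_check_for_all_zeros := by
  intro X i j _ hpre
  obtain ⟨hi, _⟩ := hpre
  unfold Spec_check_for_all_zeros check_for_all_zeros check_for_all_zeros_alt
  have hmem : ∀ m ∈ PySem.List.pyRange i (X.length : Int) 1, 0 ≤ m := by
    intro m hm
    have := (PySem.List.mem_pyRange_one.mp hm).1
    omega
  simp only []
  rw [cfazLoop_fst, cfazLoop_snd X j _ hmem]
  simp only [List.nil_append]
  exact Prod.ext (sum_indicator_eq_count _ _) rfl
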